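-- pv_equiv track=rewrite | github.com/Al153/Programming | YRS 2013/python to sql api/PostcodeSort.py | filter_characters
-- ===== SOURCE A (Python) =====
-- def filter_characters(postcode_list): #chops postcodes down to form ABxy (or equivalent)
-- 	prefixes = []
-- 	suffixes = []
-- 	for line in postcode_list:
-- 		prefix = ''
-- 		state = "prefix"
-- 		suffix = ''
-- 		for character in line:
-- 			if character == ' ':
-- 				state = "suffix"
-- 			else:
-- 				if state == "prefix":
-- 					prefix += character
-- 				else:
-- 					suffix += character
-- 		prefixes.append(prefix)
-- 		suffixes.append(suffix)
-- 	return prefixes,suffixes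
-- ===== SOURCE B (Python) =====
-- def filter_characters(postcode_list):
--     prefixes = [line.split(' ')[0] for line in postcode_list]
--     suffixes = [''.join(line.split(' ')[1:]) for line in postcode_list]
--     return prefixes, suffixes
-- ===== Notes on version B (the rewrite author's own statement) =====
-- stated objective: simpler
-- what changed: Replaces the per-character prefix/suffix state machine with two list comprehensions that split each line on spaces, taking the first part as prefix and joining the remaining parts (which drops every space) as suffix.
import Mathlib
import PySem

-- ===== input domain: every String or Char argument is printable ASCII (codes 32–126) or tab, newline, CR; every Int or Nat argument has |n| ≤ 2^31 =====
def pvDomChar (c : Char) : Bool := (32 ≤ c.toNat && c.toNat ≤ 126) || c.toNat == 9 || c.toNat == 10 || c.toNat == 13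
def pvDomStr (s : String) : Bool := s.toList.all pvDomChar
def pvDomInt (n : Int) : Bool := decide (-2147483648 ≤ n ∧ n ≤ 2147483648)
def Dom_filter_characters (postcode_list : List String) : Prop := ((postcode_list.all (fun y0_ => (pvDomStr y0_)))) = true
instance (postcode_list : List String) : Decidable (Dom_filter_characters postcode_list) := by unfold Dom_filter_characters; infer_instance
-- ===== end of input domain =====

-- B replaces A's per-character prefix/suffix state machine with split(' ')/join comprehensions (simpler decomposition, same cost).

-- ===== PORT A =====
-- A's inner loop state: (prefix chars so far, in-suffix flag ("suffix" state), suffix chars so far)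
def pvStepA (st : List Char × Bool × List Char) (c : Char) : List Char × Bool × List Char :=
  if c = ' ' then (st.1, true, st.2.2)
  else if st.2.1 then (st.1, true, st.2.2 ++ [c])
  else (st.1 ++ [c], false, st.2.2)

def pvLineA (acc : List String × List String) (line : String) : List String × List String :=
  let st := line.toList.foldl pvStepA ([], false, [])
  (acc.1 ++ [String.ofList st.1], acc.2 ++ [String.ofList st.2.2])

def filter_characters (postcode_list : List String) : List String × List String :=
  postcode_list.foldl pvLineA ([], [])

-- ===== PORT B =====
-- parts = line.split(' '); parts[0] never raises since split(' ') always yields at least one part,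
-- so the .getD "" default is unreachable.
def filter_characters_alt (postcode_list : List String) : List String × List String :=
  ( postcode_list.map (fun line =>
      (PySem.List.pyGet? ((PySem.Str.split? line " ").getD []) 0).getD "")
  , postcode_list.map (fun line =>
      PySem.Str.join "" (PySem.List.slice ((PySem.Str.split? line " ").getD []) (some 1) none)) )

-- ===== PRECONDITION & SPEC =====
def Spec_filter_characters (postcode_list : List String) (out : List String × List String) : Prop := out = filter_characters_alt postcode_list
instance (postcode_list : List String) (out : List String × List String) : Decidable (Spec_filter_characters postcode_list out) := by unfold Spec_filter_characters; infer_instance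

-- ===== CLAIM (what is proved, stated in full; the proofs are below) =====
def Claim_equal_filter_characters : Prop := ∀ (postcode_list : List String), Dom_filter_characters postcode_list → Spec_filter_characters postcode_list (filter_characters postcode_list)

-- ===== LEMMAS AND PROOFS =====

-- common characterization: per-line prefix and suffix
def pvPre (line : String) : String := String.ofList (line.toList.takeWhile (· ≠ ' '))
def pvSuf (line : String) : String :=
  String.ofList ((line.toList.dropWhile (· ≠ ' ')).filter (· ≠ ' '))

-- structural single-char split (proof helper; proved equal to PySem.Chars.splitOn · [' '])
def pvSplit : List Char → List Char → List (List Char)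
  | [], cur => [cur.reverse]
  | c :: rest, cur => if c = ' ' then cur.reverse :: pvSplit rest [] else pvSplit rest (c :: cur)

-- A side: suffix-state fold
theorem foldA_suffix (cs : List Char) (p s : List Char) :
    cs.foldl pvStepA (p, true, s) = (p, true, s ++ cs.filter (· ≠ ' ')) := by
  induction cs generalizing s with
  | nil => simp
  | cons c rest ih =>
    by_cases hc : c = ' ' <;> simp [pvStepA, hc, List.filter_cons, ih]

theorem foldA_prefix (cs : List Char) (p s : List Char) :
    cs.foldl pvStepA (p, false, s) =
      (p ++ cs.takeWhile (· ≠ ' '), cs.any (· = ' '),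
       s ++ (cs.dropWhile (· ≠ ' ')).filter (· ≠ ' ')) := by
  induction cs generalizing p with
  | nil => simp
  | cons c rest ih =>
    by_cases hc : c = ' '
    · simp [pvStepA, hc, foldA_suffix, List.takeWhile_cons, List.dropWhile_cons,
        List.filter_cons]
    · simp [pvStepA, hc, ih, List.takeWhile_cons, List.dropWhile_cons]

theorem foldA_outer (pl : List String) (a b : List String) :
    pl.foldl pvLineA (a, b) = (a ++ pl.map pvPre, b ++ pl.map pvSuf) := by
  induction pl generalizing a b with
  | nil => simp
  | cons line rest ih =>
    rw [List.foldl_cons]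
    have hstep : pvLineA (a, b) line = (a ++ [pvPre line], b ++ [pvSuf line]) := by
      simp [pvLineA, foldA_prefix, pvPre, pvSuf]
    rw [hstep, ih]
    simp

-- B side: splitOn [' '] equals pvSplit
theorem go_eq_pvSplit (fuel : Nat) (l cur : List Char) (acc : List (List Char))
    (h : l.length < fuel) :
    PySem.Chars.splitOn.go [' '] fuel l cur acc = acc.reverse ++ pvSplit l cur := by
  induction fuel generalizing l cur acc with
  | zero => omega
  | succ fuel ih =>
    cases l with
    | nil => simp [PySem.Chars.splitOn.go, pvSplit]
    | cons c rest =>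
      by_cases hc : c = ' '
      · subst hc
        have hpre : List.isPrefixOf [' '] (' ' :: rest) = true := by
          simp [List.isPrefixOf]
        rw [PySem.Chars.splitOn.go]
        simp only [hpre, if_true, List.length, List.drop]
        rw [ih rest [] (List.reverse cur :: acc) (by simpa using Nat.lt_of_succ_lt_succ h)]
        simp [pvSplit]
      · have hpre : List.isPrefixOf [' '] (c :: rest) = false := by
          simp [List.isPrefixOf, hc]
          intro h'; exact absurd h'.symm hc
        rw [PySem.Chars.splitOn.go]
        simp only [hpre, Bool.false_eq_true, if_false]
        rw [ih rest (c :: cur) acc (by simpa using Nat.lt_of_succ_lt_succ h)]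
        simp [pvSplit, hc]

theorem splitOn_eq_pvSplit (cs : List Char) :
    PySem.Chars.splitOn cs [' '] = pvSplit cs [] := by
  rw [PySem.Chars.splitOn, go_eq_pvSplit cs.length.succ cs [] [] (Nat.lt_succ_self _)]
  simp

theorem flatten_pvSplit (cs : List Char) (cur : List Char) :
    (pvSplit cs cur).flatten = cur.reverse ++ cs.filter (· ≠ ' ') := by
  induction cs generalizing cur with
  | nil => simp [pvSplit]
  | cons c rest ih =>
    by_cases hc : c = ' ' <;> simp [pvSplit, hc, ih, List.filter_cons]

theorem pvSplit_head_tail (cs : List Char) (cur : List Char) :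
    ∃ ps, pvSplit cs cur = (cur.reverse ++ cs.takeWhile (· ≠ ' ')) :: ps ∧
      ps.flatten = (cs.dropWhile (· ≠ ' ')).filter (· ≠ ' ') := by
  induction cs generalizing cur with
  | nil => exact ⟨[], by simp [pvSplit]⟩
  | cons c rest ih =>
    by_cases hc : c = ' '
    · refine ⟨pvSplit rest [], ?_, ?_⟩
      · simp [pvSplit, hc, List.takeWhile_cons]
      · simp [flatten_pvSplit, hc, List.dropWhile_cons, List.filter_cons]
    · obtain ⟨ps, h1, h2⟩ := ih (c :: cur)
      refine ⟨ps, ?_, ?_⟩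
      · simp [pvSplit, hc, h1, List.takeWhile_cons]
      · simpa [List.dropWhile_cons, hc] using h2

theorem join_nil_flatten (pss : List (List Char)) :
    PySem.Chars.join [] pss = pss.flatten := by
  simp only [PySem.Chars.join, List.intercalate]
  induction pss with
  | nil => simp
  | cons p rest ih => cases rest <;> simp_all [List.intersperse]

theorem split_parts (line : String) :
    (PySem.Str.split? line " ").getD [] = (pvSplit line.toList []).map String.ofList := by
  simp [PySem.Str.split?, PySem.Chars.split?, splitOn_eq_pvSplit]

theorem altB_pre (line : String) :
    (PySem.List.pyGet? ((PySem.Str.split? line " ").getD []) 0).getD "" = pvPre line := by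
  obtain ⟨ps, h1, _⟩ := pvSplit_head_tail line.toList []
  simp [split_parts, h1, PySem.List.pyGet?, PySem.List.pyIdx?, pvPre]

theorem altB_suf (line : String) :
    PySem.Str.join "" (PySem.List.slice ((PySem.Str.split? line " ").getD []) (some 1) none) = pvSuf line := by
  obtain ⟨ps, h1, h2⟩ := pvSplit_head_tail line.toList []
  rw [split_parts, h1]
  rw [PySem.List.slice_from _ (by norm_num : (0:Int) ≤ 1)]
  simp only [Int.toNat_one, List.map_cons, List.drop_succ_cons, List.drop_zero]
  have hfl : (List.map (String.toList ∘ String.ofList) ps).flatten = ps.flatten := by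
    simp [Function.comp_def]
  simp [PySem.Str.join, join_nil_flatten, hfl, h2, pvSuf, decide_not]

-- ===== VERDICT (by name: the statement is the Claim_ definition above) =====
theorem filter_characters_spec : Claim_equal_filter_characters := by
  intro pl _
  show filter_characters pl = filter_characters_alt pl
  rw [filter_characters, foldA_outer]
  simp [filter_characters_alt, altB_pre, altB_suf]
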